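-- pv_equiv track=rewrite | github.com/mwaldstein/qipu | scripts/check_function_complexity.py | count_braces_outside_strings
-- ===== SOURCE A (Python) =====
-- def count_braces_outside_strings(line):
--     """Count braces only outside string/char literals."""
--     count_open = 0
--     count_close = 0
--     in_string = False
--     in_char = False
--     escape_next = False
--
--     for i, ch in enumerate(line):
--         if escape_next:
--             escape_next = False
--             continue
--
--         if ch == '\\':
--             escape_next = True
--             continue
--
--         if in_string:
--             if ch == '"':
--                 in_string = False
--             continue
--
--         if in_char:
--             if ch == "'":
--                 in_char = False
--             continue
--
--         if ch == '"':
--             in_string = True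
--         elif ch == "'":
--             in_char = True
--         elif ch == '{':
--             count_open += 1
--         elif ch == '}':
--             count_close += 1
--
--     return count_open, count_close
-- ===== SOURCE B (Python) =====
-- import re
--
-- def count_braces_outside_strings(line):
--     """Count braces only outside string/char literals (transform-then-count)."""
--     s = re.sub(r'\\.', '', line, flags=re.DOTALL)
--     s = re.sub(r'"[^"]*(?:"|$)|\'[^\']*(?:\'|$)', '', s)
--     return s.count('{'), s.count('}')
-- ===== Notes on version B (the rewrite author's own statement) =====
-- stated objective: idiomatic
-- what changed: Replaces A's single five-state character scan with a transform-then-count pipeline: one regex deletes escape pairs, a second blanks string/char literals (swallowing unterminated ones to end of line), then str.count tallies the braces.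
import Mathlib
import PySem

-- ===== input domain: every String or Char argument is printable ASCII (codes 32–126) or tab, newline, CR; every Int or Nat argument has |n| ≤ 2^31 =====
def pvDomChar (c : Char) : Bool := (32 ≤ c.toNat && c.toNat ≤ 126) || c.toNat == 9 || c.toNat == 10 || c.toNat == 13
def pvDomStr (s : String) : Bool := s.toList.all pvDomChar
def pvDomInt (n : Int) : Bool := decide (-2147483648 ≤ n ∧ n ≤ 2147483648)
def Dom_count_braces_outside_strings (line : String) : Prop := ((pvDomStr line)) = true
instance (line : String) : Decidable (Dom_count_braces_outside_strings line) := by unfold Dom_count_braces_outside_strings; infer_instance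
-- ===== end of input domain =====

-- B replaces A's five-variable stateful scan by a transform-then-count pipeline
-- (strip escape pairs, then blank out string/char literals, then count); objective: idiomatic.

-- ===== PORT A =====
-- the for-loop of A: state (escape_next, in_string, in_char, count_open, count_close)
def pvLoopA : List Char → Bool → Bool → Bool → Int → Int → Int × Int
  | [], _, _, _, co, cc => (co, cc)
  | ch :: rest, esc, instr, inch, co, cc =>
    if esc then pvLoopA rest false instr inch co cc
    else if ch = '\\' then pvLoopA rest true instr inch co cc
    else if instr then pvLoopA rest false (if ch = '"' then false else instr) inch co cc
    else if inch then pvLoopA rest false instr (if ch = '\'' then false else inch) co cc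
    else if ch = '"' then pvLoopA rest false true inch co cc
    else if ch = '\'' then pvLoopA rest false instr true co cc
    else if ch = '{' then pvLoopA rest false instr inch (co + 1) cc
    else if ch = '}' then pvLoopA rest false instr inch co (cc + 1)
    else pvLoopA rest false instr inch co cc

def count_braces_outside_strings (line : String) : Int × Int :=
  pvLoopA line.toList false false false 0 0

-- ===== PORT B =====
-- hand port of re.sub(r'\\.', '', s, flags=re.DOTALL): exact — the regex removes
-- non-overlapping backslash+any-char pairs left to right; a lone trailing backslash stays.
def pvStripEsc : List Char → List Char
  | '\\' :: _ :: rest => pvStripEsc rest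
  | c :: rest => c :: pvStripEsc rest
  | [] => []

-- drop everything up to and including the first occurrence of q (all of it if absent):
-- this is what one match of  "[^"]*(?:"|$)  (resp. the ' variant) deletes after its opener.
def pvDropQuote (q : Char) : List Char → List Char
  | [] => []
  | c :: rest => if c = q then rest else pvDropQuote q rest

theorem pvDropQuote_len (q : Char) (l : List Char) : (pvDropQuote q l).length ≤ l.length := by
  induction l with
  | nil => simp [pvDropQuote]
  | cons c rest ih =>
    simp only [pvDropQuote]
    split
    · simp
    · simpa using Nat.le_succ_of_le ih

-- hand port of re.sub(r'"[^"]*(?:"|$)|\'[^\']*(?:\'|$)', '', s): exact — leftmost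
-- non-overlapping matches start at the first quote of either kind and swallow up to the
-- closing quote, or the rest of the line if unterminated.
def pvStripLit : List Char → List Char
  | [] => []
  | c :: rest =>
    if c = '"' then pvStripLit (pvDropQuote '"' rest)
    else if c = '\'' then pvStripLit (pvDropQuote '\'' rest)
    else c :: pvStripLit rest
  termination_by l => l.length
  decreasing_by
    · exact Nat.lt_succ_of_le (pvDropQuote_len _ _)
    · exact Nat.lt_succ_of_le (pvDropQuote_len _ _)
    · simp

def count_braces_outside_strings_alt (line : String) : Int × Int :=
  let s := pvStripLit (pvStripEsc line.toList)
  ((s.count '{' : Int), (s.count '}' : Int))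

-- ===== PRECONDITION & SPEC =====
def Spec_count_braces_outside_strings (line : String) (out : Int × Int) : Prop := out = count_braces_outside_strings_alt line
instance (line : String) (out : Int × Int) : Decidable (Spec_count_braces_outside_strings line out) := by unfold Spec_count_braces_outside_strings; infer_instance

-- ===== CLAIM (what is proved, stated in full; the proofs are below) =====
def Claim_equal_count_braces_outside_strings : Prop := ∀ (line : String), Dom_count_braces_outside_strings line → Spec_count_braces_outside_strings line (count_braces_outside_strings line)

-- ===== LEMMAS AND PROOFS =====

def pvCnt (co cc : Int) (s : List Char) : Int × Int :=
  (co + (s.count '{' : Int), cc + (s.count '}' : Int))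

theorem pvCnt_cons_other (co cc : Int) (c : Char) (s : List Char)
    (h1 : c ≠ '{') (h2 : c ≠ '}') : pvCnt co cc (c :: s) = pvCnt co cc s := by
  simp [pvCnt, h1, h2]

theorem pvCnt_cons_open (co cc : Int) (s : List Char) :
    pvCnt co cc ('{' :: s) = pvCnt (co + 1) cc s := by
  simp [pvCnt]; ring

theorem pvCnt_cons_close (co cc : Int) (s : List Char) :
    pvCnt co cc ('}' :: s) = pvCnt co (cc + 1) s := by
  simp [pvCnt]; ring

theorem pvKey : ∀ (n : ℕ) (l : List Char), l.length ≤ n → ∀ (co cc : Int),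
    pvLoopA l false false false co cc = pvCnt co cc (pvStripLit (pvStripEsc l)) ∧
    pvLoopA l false true false co cc = pvCnt co cc (pvStripLit (pvDropQuote '"' (pvStripEsc l))) ∧
    pvLoopA l false false true co cc = pvCnt co cc (pvStripLit (pvDropQuote '\'' (pvStripEsc l))) := by
  intro n
  induction n with
  | zero =>
    intro l hl co cc
    have : l = [] := List.eq_nil_of_length_eq_zero (Nat.le_zero.mp hl)
    subst this
    simp [pvLoopA, pvStripEsc, pvStripLit, pvDropQuote, pvCnt]
  | succ n ih =>
    intro l hl co cc
    match l with
    | [] => simp [pvLoopA, pvStripEsc, pvStripLit, pvDropQuote, pvCnt]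
    | ch :: rest =>
      have hr : rest.length ≤ n := by simpa using Nat.lt_succ_iff.mp (Nat.lt_of_lt_of_le (by simp) hl)
      by_cases hbs : ch = '\\'
      · subst hbs
        match rest with
        | [] =>
          refine ⟨?_, ?_, ?_⟩ <;>
            simp [pvLoopA, pvStripEsc, pvStripLit, pvDropQuote, pvCnt]
        | c :: rest' =>
          have hr' : rest'.length ≤ n := le_trans (by simp) hr
          obtain ⟨h0, h1, h2⟩ := ih rest' hr' co cc
          refine ⟨?_, ?_, ?_⟩ <;> simp [pvLoopA, pvStripEsc, h0, h1, h2]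
      · obtain ⟨h0, h1, h2⟩ := ih rest hr co cc
        have hesc : pvStripEsc (ch :: rest) = ch :: pvStripEsc rest := by
          rw [pvStripEsc.eq_def]; cases rest <;> simp [hbs]
        refine ⟨?_, ?_, ?_⟩
        · -- outside any literal
          by_cases hdq : ch = '"'
          · subst hdq; simp [pvLoopA, hesc, pvStripLit, h1]
          · by_cases hsq : ch = '\''
            · subst hsq; simp [pvLoopA, hbs, hesc, pvStripLit, hdq, h2]
            · by_cases hob : ch = '{'
              · subst hob
                have h0' := (ih rest hr (co + 1) cc).1
                simp [pvLoopA, hesc, pvStripLit, h0', pvCnt_cons_open]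
              · by_cases hcb : ch = '}'
                · subst hcb
                  have h0' := (ih rest hr co (cc + 1)).1
                  simp [pvLoopA, hbs, hesc, pvStripLit, h0', pvCnt_cons_close]
                · simp [pvLoopA, hbs, hdq, hsq, hob, hcb, hesc, pvStripLit, h0,
                        pvCnt_cons_other co cc ch _ hob hcb]
        · -- inside a string literal
          by_cases hdq : ch = '"'
          · subst hdq; simp [pvLoopA, hesc, pvDropQuote, h0]
          · simp [pvLoopA, hbs, hdq, hesc, pvDropQuote, h1]
        · -- inside a char literal
          by_cases hsq : ch = '\''
          · subst hsq; simp [pvLoopA, hbs, hesc, pvDropQuote, h0]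
          · simp [pvLoopA, hbs, hsq, hesc, pvDropQuote, h2]

-- ===== VERDICT (by name: the statement is the Claim_ definition above) =====
theorem count_braces_outside_strings_spec : Claim_equal_count_braces_outside_strings := by
  intro line _
  unfold Spec_count_braces_outside_strings count_braces_outside_strings count_braces_outside_strings_alt
  have h := (pvKey line.toList.length line.toList le_rfl 0 0).1
  simpa [pvCnt] using h
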